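-- pv_equiv track=rewrite | github.com/ulyanov-parallels/2gis-zenith-visual-tests | project/comparison/log_comparison.py | _insert_markers
-- ===== SOURCE A (Python) =====
-- def _insert_markers(diff_content, log_content):
--     if diff_content is None:
--         return log_content
--
--     result = []
--     for log_line in log_content:
--
--         #TODO: With current approach all duplicated lines in log_content will be marked if at least one of them has diff
--
--         found_symbol = False
--         for symbol in ['-', '+', '?']:
--             log_line_with_symbol = '{} {}'.format(symbol, log_line)
--             if log_line_with_symbol in diff_content:
--                 result.append(log_line_with_symbol)
--                 found_symbol = True
--                 break
--         if not found_symbol: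
--             result.append(log_line)
--
--     return result
-- ===== SOURCE B (Python) =====
-- _PRIO = {'- ': 0, '+ ': 1, '? ': 2}
--
--
-- def _insert_markers(diff_content, log_content):
--     if diff_content is None:
--         return log_content
--
--     # One pass over the diff: index marker lines by their payload (line[2:]),
--     # keeping the marker head of highest priority ('- ' > '+ ' > '? ').
--     best = {}
--     for line in diff_content:
--         head = line[:2]
--         if head in _PRIO:
--             rest = line[2:]
--             cur = best.get(rest)
--             if cur is None or _PRIO[head] < _PRIO[cur]:
--                 best[rest] = head
--
--     # One pass over the log: a single dict lookup per line.
--     out = []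
--     for log_line in log_content:
--         head = best.get(log_line)
--         out.append(log_line if head is None else head + log_line)
--     return out
-- ===== Notes on version B (the rewrite author's own statement) =====
-- stated objective: faster
-- what changed: Instead of testing three candidate strings per log line against the whole diff list, B scans the diff once to build a dict from payload line[2:] to the best-priority marker head, then resolves each log line with one dict lookup.
import Mathlib
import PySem

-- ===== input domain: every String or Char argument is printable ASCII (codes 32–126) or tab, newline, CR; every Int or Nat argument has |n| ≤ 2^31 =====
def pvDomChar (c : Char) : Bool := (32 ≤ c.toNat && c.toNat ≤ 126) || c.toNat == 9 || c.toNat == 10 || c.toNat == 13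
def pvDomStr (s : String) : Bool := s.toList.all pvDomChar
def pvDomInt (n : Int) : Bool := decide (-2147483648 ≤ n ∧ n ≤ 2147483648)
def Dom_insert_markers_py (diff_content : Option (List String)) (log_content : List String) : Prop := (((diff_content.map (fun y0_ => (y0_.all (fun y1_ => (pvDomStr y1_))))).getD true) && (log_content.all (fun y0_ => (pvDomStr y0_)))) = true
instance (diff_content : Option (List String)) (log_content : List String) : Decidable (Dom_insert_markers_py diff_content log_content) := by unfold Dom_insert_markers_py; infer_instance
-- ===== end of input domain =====

-- B replaces A's per-line scan over three candidate strings (each an O(|diff|) membership test)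
-- with a single pass over the diff building a payload→marker dict, then one lookup per log line.


-- ===== PORT A =====
-- inner 'for symbol in ['-','+','?']: … break' loop of A
def pvFindSymbol (d : List String) (log_line : String) : List String → Option String
  | [] => none
  | s :: rest =>
    let log_line_with_symbol := s ++ " " ++ log_line
    if log_line_with_symbol ∈ d then some log_line_with_symbol
    else pvFindSymbol d log_line rest

def insert_markers_py (diff_content : Option (List String)) (log_content : List String) : List String :=
  match diff_content with
  | none => log_content
  | some d =>
    log_content.foldl (fun result log_line =>
      match pvFindSymbol d log_line ["-", "+", "?"] with
      | some cand => result ++ [cand]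
      | none => result ++ [log_line]) []

-- ===== PORT B =====
-- _PRIO of Source B (lookup of a head string's priority)
def pvPrio (h : String) : Int :=
  if h = "- " then 0 else if h = "+ " then 1 else 2

-- body of Source B's first loop (index the diff by payload, best marker wins)
def pvBuildStep (best : PySem.Dict String String) (line : String) : PySem.Dict String String :=
  let head := PySem.Str.slice line none (some 2)
  if head = "- " ∨ head = "+ " ∨ head = "? " then
    let rest := PySem.Str.slice line (some 2) none
    match best.get? rest with
    | none => best.insert rest head
    | some cur => if pvPrio head < pvPrio cur then best.insert rest head else best
  else best

def insert_markers_py_alt (diff_content : Option (List String)) (log_content : List String) : List String :=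
  match diff_content with
  | none => log_content
  | some d =>
    let best := d.foldl pvBuildStep PySem.Dict.empty
    log_content.foldl (fun out log_line =>
      match best.get? log_line with
      | none => out ++ [log_line]
      | some head => out ++ [head ++ log_line]) []

-- ===== PRECONDITION & SPEC =====
def Spec_insert_markers_py (diff_content : Option (List String)) (log_content : List String) (out : List String) : Prop := out = insert_markers_py_alt diff_content log_content
instance (diff_content : Option (List String)) (log_content : List String) (out : List String) : Decidable (Spec_insert_markers_py diff_content log_content out) := by unfold Spec_insert_markers_py; infer_instance

-- ===== CLAIM (what is proved, stated in full; the proofs are below) =====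
def Claim_equal_insert_markers_py : Prop := ∀ (diff_content : Option (List String)) (log_content : List String), Dom_insert_markers_py diff_content log_content → Spec_insert_markers_py diff_content log_content (insert_markers_py diff_content log_content)

-- ===== LEMMAS AND PROOFS =====

-- the common characterisation: first marker head (in priority order) whose marked line is in d
def pvSpecGet (d : List String) (k : String) : Option String :=
  if ("- " ++ k) ∈ d then some "- "
  else if ("+ " ++ k) ∈ d then some "+ "
  else if ("? " ++ k) ∈ d then some "? "
  else none

theorem pvFindSymbol_eq (d : List String) (l : String) :
    pvFindSymbol d l ["-", "+", "?"] = (pvSpecGet d l).map (· ++ l) := by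
  have h1 : ("-" ++ " " ++ l) = ("- " ++ l) := by
    rw [← String.toList_inj]; simp
  have h2 : ("+" ++ " " ++ l) = ("+ " ++ l) := by
    rw [← String.toList_inj]; simp
  have h3 : ("?" ++ " " ++ l) = ("? " ++ l) := by
    rw [← String.toList_inj]; simp
  simp only [pvFindSymbol, pvSpecGet, h1, h2, h3]
  split_ifs <;> simp

theorem pvHead_of_append (s k x : String) (hs : s.toList.length = 2)
    (hx : x = s ++ k) : PySem.Str.slice x none (some 2) = s := by
  rw [← String.toList_inj]
  simp [PySem.Str.toList_slice, PySem.List.slice_to, hx]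
  rw [List.take_append_of_le_length (by omega)]
  exact List.take_of_length_le hs.le

theorem pvAppend_cancel (s k k' : String) (h : s ++ k = s ++ k') : k = k' := by
  rw [← String.toList_inj] at h ⊢
  simpa using h

-- decomposition of a line whose first two chars are the marker head
theorem pvDecomp (x : String) :
    x = PySem.Str.slice x none (some 2) ++ PySem.Str.slice x (some 2) none := by
  rw [← String.toList_inj]
  simp [PySem.Str.toList_slice, PySem.List.slice_to, PySem.List.slice_from]

theorem pvAppend_cancel_right (s t r : String) (h : s ++ r = t ++ r) : s = t := by
  rw [← String.toList_inj] at h ⊢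
  simp only [String.toList_append] at h
  exact List.append_cancel_right h

theorem pvNeHead (s t r : String) (hne : s ≠ t) : s ++ r ≠ t ++ r :=
  fun he => hne (pvAppend_cancel_right s t r he)

-- appending one marker line 's ++ r' to the diff updates pvSpecGet at r by priority
theorem pvSpecGet_append_marker (d : List String) (r s : String)
    (hs : s = "- " ∨ s = "+ " ∨ s = "? ") :
    pvSpecGet (d ++ [s ++ r]) r =
      some (match pvSpecGet d r with
            | none => s
            | some c => if pvPrio s < pvPrio c then s else c) := by
  have n1 := pvNeHead "- " "+ " r (by decide)
  have n2 := pvNeHead "- " "? " r (by decide)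
  have n3 := pvNeHead "+ " "- " r (by decide)
  have n4 := pvNeHead "+ " "? " r (by decide)
  have n5 := pvNeHead "? " "- " r (by decide)
  have n6 := pvNeHead "? " "+ " r (by decide)
  rcases hs with rfl | rfl | rfl <;>
    simp only [pvSpecGet, List.mem_append, List.mem_singleton, n1, n2, n3, n4, n5, n6] <;>
    split_ifs <;> simp_all [pvPrio]

-- appending any line x changes pvSpecGet only at x's own payload
theorem pvSpecGet_append_other (d : List String) (k x : String)
    (hnm : ∀ s : String, s = "- " ∨ s = "+ " ∨ s = "? " → (s ++ k) ≠ x) :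
    pvSpecGet (d ++ [x]) k = pvSpecGet d k := by
  simp [pvSpecGet, List.mem_append, hnm "- " (by simp), hnm "+ " (by simp),
    hnm "? " (by simp)]

-- one step of Source B's build loop preserves the pvSpecGet characterisation
theorem pvStep_get (d : List String) (x k : String) (B : PySem.Dict String String)
    (hB : ∀ j, B.get? j = pvSpecGet d j) :
    (pvBuildStep B x).get? k = pvSpecGet (d ++ [x]) k := by
  simp only [pvBuildStep]
  by_cases hq : PySem.Str.slice x none (some 2) = "- " ∨
      PySem.Str.slice x none (some 2) = "+ " ∨ PySem.Str.slice x none (some 2) = "? "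
  · have hxd := pvDecomp x
    rw [if_pos hq]
    set hd := PySem.Str.slice x none (some 2) with hhd
    set r := PySem.Str.slice x (some 2) none with hr
    by_cases hk : k = r
    · -- k is exactly the payload of the marker line x
      subst hk
      rw [hB r, hxd, pvSpecGet_append_marker d r hd hq]
      cases hc : pvSpecGet d r with
      | none => simp [PySem.Dict.get?_insert_self]
      | some cur =>
        dsimp only
        split_ifs <;> simp [PySem.Dict.get?_insert_self, hB, hc]
    · -- k is not the payload: the step leaves get? k untouched and x marks no candidate of k
      have hnm : ∀ s : String, s = "- " ∨ s = "+ " ∨ s = "? " → (s ++ k) ≠ x := by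
        intro s hs he
        have h1 : hd = s :=
          pvHead_of_append s k x (by rcases hs with rfl | rfl | rfl <;> decide) he.symm
        have hx2 : x = s ++ r := h1 ▸ hxd
        exact hk (pvAppend_cancel s k r (he.trans hx2))
      rw [pvSpecGet_append_other d k x hnm, ← hB k]
      cases B.get? r with
      | none => rw [PySem.Dict.get?_insert]; simp [hk]
      | some cur =>
        dsimp only
        split_ifs
        · rw [PySem.Dict.get?_insert]; simp [hk]
        · rfl
  · -- x is not a marker line: the dict is unchanged and x matches no candidate
    rw [if_neg hq, hB k]
    have hnm : ∀ s : String, s = "- " ∨ s = "+ " ∨ s = "? " → (s ++ k) ≠ x := by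
      intro s hs he
      have h1 : PySem.Str.slice x none (some 2) = s :=
        pvHead_of_append s k x (by rcases hs with rfl | rfl | rfl <;> decide) he.symm
      exact hq (by rcases hs with rfl | rfl | rfl <;> simp [h1])
    rw [pvSpecGet_append_other d k x hnm]

-- the main invariant: the dict built by Source B's first loop computes pvSpecGet
theorem pvBuild_get (d : List String) (k : String) :
    (d.foldl pvBuildStep PySem.Dict.empty).get? k = pvSpecGet d k := by
  induction d using List.reverseRecOn generalizing k with
  | nil => simp [pvSpecGet, PySem.Dict.get?_empty]
  | append_singleton d x ih =>
    rw [List.foldl_append]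
    exact pvStep_get d x k _ ih

-- ===== VERDICT (by name: the statement is the Claim_ definition above) =====
theorem insert_markers_py_spec : Claim_equal_insert_markers_py := by
  intro diff_content log_content hdom
  clear hdom
  unfold Spec_insert_markers_py insert_markers_py insert_markers_py_alt
  cases diff_content with
  | none => rfl
  | some d =>
    simp only
    induction log_content using List.reverseRecOn with
    | nil => rfl
    | append_singleton ls l ih =>
      rw [List.foldl_append, List.foldl_append, ih]
      simp only [List.foldl, pvFindSymbol_eq, pvBuild_get]
      cases h : pvSpecGet d l with
      | none => rfl
      | some cur => rfl
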